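-- pv_equiv track=rewrite | github.com/Jacobinwwey/astrbot_plugin_onesync | skills_astrbot_state_core.py | _merged_scope_root_candidates
-- ===== SOURCE A (Python) =====
-- from typing import Any
--
-- def _to_str_list(value: Any) -> list[str]:
--     if value is None:
--         return []
--     if isinstance(value, (list, tuple, set)):
--         result: list[str] = []
--         for item in value:
--             text = str(item or "").strip()
--             if text:
--                 result.append(text)
--         return result
--     text = str(value or "").strip()
--     return [text] if text else []
--
-- def _dedupe_keep_order(values: list[str]) -> list[str]:
--     result: list[str] = []
--     seen: set[str] = set()
--     for item in values:
--         text = str(item or "").strip()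
--         if not text or text in seen:
--             continue
--         seen.add(text)
--         result.append(text)
--     return result
--
-- def _merged_scope_root_candidates(host: dict[str, Any]) -> list[str]:
--     resolved_roots = _to_str_list(host.get("resolved_skill_roots", []))
--     declared_roots = _to_str_list(host.get("declared_skill_roots", []))
--     merged: list[str] = []
--     max_len = max(len(resolved_roots), len(declared_roots))
--     for index in range(max_len):
--         resolved = str(resolved_roots[index] or "").strip() if index < len(resolved_roots) else ""
--         declared = str(declared_roots[index] or "").strip() if index < len(declared_roots) else ""
--         if resolved:
--             merged.append(resolved)
--             continue
--         if declared:
--             merged.append(declared)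
--     if merged:
--         return _dedupe_keep_order(merged)
--     return _dedupe_keep_order(resolved_roots + declared_roots)
-- ===== SOURCE B (Python) =====
-- def _dedupe_keep_order(values):
--     seen = set()
--     out = []
--     for t in values:
--         if t not in seen:
--             seen.add(t)
--             out.append(t)
--     return out
--
-- def _clean(values):
--     return [t for t in (str(s).strip() for s in values) if t]
--
-- def _merged_scope_root_candidates(host):
--     resolved = _clean(host.get("resolved_skill_roots", []))
--     declared = _clean(host.get("declared_skill_roots", []))
--     return _dedupe_keep_order(resolved + declared[len(resolved):])
-- ===== Notes on version B (the rewrite author's own statement) =====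
-- stated objective: simpler
-- what changed: Replaces the max_len index-merge loop and the both-empty fallback branch with a direct concatenation: cleaned resolved roots always win at overlapping indices, so B returns dedupe(resolved + declared[len(resolved):]).
import Mathlib
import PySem

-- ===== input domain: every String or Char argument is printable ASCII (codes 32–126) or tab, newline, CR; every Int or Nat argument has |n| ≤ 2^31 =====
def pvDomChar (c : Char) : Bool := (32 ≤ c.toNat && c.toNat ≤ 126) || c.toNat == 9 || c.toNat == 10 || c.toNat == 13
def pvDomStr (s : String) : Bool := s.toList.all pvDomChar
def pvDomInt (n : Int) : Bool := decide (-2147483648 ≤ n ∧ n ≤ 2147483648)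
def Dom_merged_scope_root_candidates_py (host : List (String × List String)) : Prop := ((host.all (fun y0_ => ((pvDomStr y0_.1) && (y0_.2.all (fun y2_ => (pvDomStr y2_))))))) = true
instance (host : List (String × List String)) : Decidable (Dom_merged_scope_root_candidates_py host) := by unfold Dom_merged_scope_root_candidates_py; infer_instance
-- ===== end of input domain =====

-- B replaces A's max_len index-merge loop and fallback branch with dedupe(resolved ++ declared tail): simpler, same cost.


-- ===== PORT A =====
-- _to_str_list, list branch (host values are lists of strings); 'str(item or "")' is ported as the if on "".
def toStrListA (value : List String) : List String :=
  value.foldl (fun result item =>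
    let text := PySem.Str.strip (if item = "" then "" else item)
    if text ≠ "" then result ++ [text] else result) []

-- _dedupe_keep_order, literally (re-strips each item, skips empties and seen items).
def dedupeA (values : List String) : List String :=
  (values.foldl (fun (st : List String × PySem.Set String) item =>
    let text := PySem.Str.strip (if item = "" then "" else item)
    if text = "" ∨ st.2.contains text then st
    else (st.1 ++ [text], st.2.add text)) ([], PySem.Set.ofList ([] : List String))).1

def merged_scope_root_candidates_py (host : List (String × List String)) : List String :=
  let resolved_roots := toStrListA ((PySem.Dict.mk host).getD "resolved_skill_roots" [])
  let declared_roots := toStrListA ((PySem.Dict.mk host).getD "declared_skill_roots" [])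
  let max_len := max resolved_roots.length declared_roots.length
  let merged := (List.range max_len).foldl (fun merged index =>
    let resolved := if index < resolved_roots.length then
        PySem.Str.strip (if resolved_roots.getD index "" = "" then "" else resolved_roots.getD index "") else ""
    let declared := if index < declared_roots.length then
        PySem.Str.strip (if declared_roots.getD index "" = "" then "" else declared_roots.getD index "") else ""
    if resolved ≠ "" then merged ++ [resolved]
    else if declared ≠ "" then merged ++ [declared]
    else merged) []
  if merged ≠ [] then dedupeA merged
  else dedupeA (resolved_roots ++ declared_roots)

-- ===== PORT B =====
-- _clean: strip every entry, keep the non-empty ones.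
def cleanB (values : List String) : List String :=
  (values.map PySem.Str.strip).filter (fun t => t ≠ "")

-- B's _dedupe_keep_order: plain first-occurrence dedupe, no re-stripping.
def dedupeB (values : List String) : List String :=
  (values.foldl (fun (st : List String × PySem.Set String) t =>
    if st.2.contains t then st
    else (st.1 ++ [t], st.2.add t)) ([], PySem.Set.ofList ([] : List String))).1

def merged_scope_root_candidates_py_alt (host : List (String × List String)) : List String :=
  let resolved := cleanB ((PySem.Dict.mk host).getD "resolved_skill_roots" [])
  let declared := cleanB ((PySem.Dict.mk host).getD "declared_skill_roots" [])
  dedupeB (resolved ++ declared.drop resolved.length)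

-- ===== PRECONDITION & SPEC =====
def Spec_merged_scope_root_candidates_py (host : List (String × List String)) (out : List String) : Prop := out = merged_scope_root_candidates_py_alt host
instance (host : List (String × List String)) (out : List String) : Decidable (Spec_merged_scope_root_candidates_py host out) := by unfold Spec_merged_scope_root_candidates_py; infer_instance

-- ===== CLAIM (what is proved, stated in full; the proofs are below) =====
def Claim_equal_merged_scope_root_candidates_py : Prop := ∀ (host : List (String × List String)), Dom_merged_scope_root_candidates_py host → Spec_merged_scope_root_candidates_py host (merged_scope_root_candidates_py host)

-- ===== LEMMAS AND PROOFS =====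
theorem dropWhile_idem {α : Type} (p : α → Bool) (l : List α) :
    List.dropWhile p (List.dropWhile p l) = List.dropWhile p l := by
  induction l with
  | nil => simp
  | cons a l ih => by_cases h : p a = true <;> simp [h, ih]

theorem chars_strip_idem (cs : List Char) :
    PySem.Chars.strip (PySem.Chars.strip cs) = PySem.Chars.strip cs := by
  unfold PySem.Chars.strip PySem.Chars.rstrip PySem.Chars.lstrip
  set p := PySem.Chars.isspace
  set A := List.dropWhile p cs with hA
  set B := List.dropWhile p A.reverse with hB
  have headA : ∀ (hl : 0 < A.length), ¬ p A[0] = true :=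
    List.dropWhile_eq_self_iff.1 (hA ▸ dropWhile_idem p cs)
  have hpre : B.reverse <+: A := by
    have := (List.reverse_prefix (l₁ := B) (l₂ := A.reverse)).2 (hB ▸ List.dropWhile_suffix p)
    simpa using this
  have hX : List.dropWhile p B.reverse = B.reverse := by
    apply List.dropWhile_eq_self_iff.2
    intro hl
    have h0 : (0 : ℕ) < A.length := lt_of_lt_of_le hl hpre.length_le
    rw [hpre.getElem hl]
    exact headA h0
  rw [hX, List.reverse_reverse, dropWhile_idem]

theorem strip_idem (s : String) : PySem.Str.strip (PySem.Str.strip s) = PySem.Str.strip s := by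
  have h := chars_strip_idem s.toList
  rw [← PySem.Str.toList_strip, ← PySem.Str.toList_strip] at h
  exact String.toList_injective h

theorem stripOr (s : String) : PySem.Str.strip (if s = "" then "" else s) = PySem.Str.strip s := by
  split <;> simp_all

theorem toStrListA_eq (v : List String) : toStrListA v = cleanB v := by
  unfold toStrListA cleanB
  simp only [stripOr]
  rw [PySem.List.foldl_append_ite (fun x => PySem.Str.strip x ≠ "") PySem.Str.strip]
  simp [List.filter_map, Function.comp_def]

theorem cleanB_mem (v : List String) (t : String) (h : t ∈ cleanB v) :
    PySem.Str.strip t = t ∧ t ≠ "" := by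
  unfold cleanB at h
  simp only [List.mem_filter, List.mem_map] at h
  obtain ⟨⟨s, _, rfl⟩, hne⟩ := h
  exact ⟨strip_idem s, by simpa using hne⟩

theorem flatMap_eq_map {α β : Type} {l : List α} {g : α → List β} {h : α → β}
    (H : ∀ i ∈ l, g i = [h i]) : l.flatMap g = l.map h := by
  induction l with
  | nil => simp
  | cons a l ih =>
      simp only [List.flatMap_cons, List.map_cons, H a List.mem_cons_self,
        ih (fun i hi => H i (List.mem_cons_of_mem a hi))]
      rfl

theorem loop_eq (r d : List String)
    (hr : ∀ t ∈ r, PySem.Str.strip t = t ∧ t ≠ "")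
    (hd : ∀ t ∈ d, PySem.Str.strip t = t ∧ t ≠ "") :
    (List.range (max r.length d.length)).foldl (fun merged index =>
      if (if index < r.length then PySem.Str.strip (if r.getD index "" = "" then "" else r.getD index "") else "") ≠ "" then
        merged ++ [if index < r.length then PySem.Str.strip (if r.getD index "" = "" then "" else r.getD index "") else ""]
      else if (if index < d.length then PySem.Str.strip (if d.getD index "" = "" then "" else d.getD index "") else "") ≠ "" then
        merged ++ [if index < d.length then PySem.Str.strip (if d.getD index "" = "" then "" else d.getD index "") else ""]
      else merged) [] = r ++ d.drop r.length := by
  have hbody : (fun (merged : List String) index =>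
      if (if index < r.length then PySem.Str.strip (if r.getD index "" = "" then "" else r.getD index "") else "") ≠ "" then
        merged ++ [if index < r.length then PySem.Str.strip (if r.getD index "" = "" then "" else r.getD index "") else ""]
      else if (if index < d.length then PySem.Str.strip (if d.getD index "" = "" then "" else d.getD index "") else "") ≠ "" then
        merged ++ [if index < d.length then PySem.Str.strip (if d.getD index "" = "" then "" else d.getD index "") else ""]
      else merged)
      = (fun merged index => merged ++
        (if (if index < r.length then PySem.Str.strip (if r.getD index "" = "" then "" else r.getD index "") else "") ≠ "" then
          [if index < r.length then PySem.Str.strip (if r.getD index "" = "" then "" else r.getD index "") else ""]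
        else if (if index < d.length then PySem.Str.strip (if d.getD index "" = "" then "" else d.getD index "") else "") ≠ "" then
          [if index < d.length then PySem.Str.strip (if d.getD index "" = "" then "" else d.getD index "") else ""]
        else [])) := by
    funext merged index
    split_ifs <;> simp
  rw [hbody, PySem.List.foldl_append_eq_flatMap, List.nil_append]
  rw [flatMap_eq_map (h := fun i => if i < r.length then r.getD i "" else d.getD i "")]
  · apply List.ext_getElem
    · simp only [List.length_map, List.length_range, List.length_append, List.length_drop]
      omega

    · intro i hi1 hi2
      simp only [List.getElem_map, List.getElem_range]
      by_cases hir : i < r.length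
      · rw [List.getElem_append_left hir, if_pos hir, List.getD_eq_getElem r "" hir]
      · have hid : i < d.length := by
          simp only [List.length_map, List.length_range] at hi1
          omega
        rw [List.getElem_append_right (le_of_not_gt hir), if_neg hir,
          List.getElem_drop, List.getD_eq_getElem d "" hid]
        congr 1
        omega
  · intro i hi
    simp only [List.mem_range] at hi
    by_cases hir : i < r.length
    · have hmem := List.getD_eq_getElem r "" hir ▸ List.getElem_mem hir
      obtain ⟨hs, hne⟩ := hr _ hmem
      rw [List.getD_eq_getElem r "" hir] at hs hne
      simp [hir, hne, hs]
    · have hid : i < d.length := by omega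
      have hmem := List.getD_eq_getElem d "" hid ▸ List.getElem_mem hid
      obtain ⟨hs, hne⟩ := hd _ hmem
      rw [List.getD_eq_getElem d "" hid] at hs hne
      simp [hir, hid, hne, hs]

theorem dedupeAB_fold : ∀ (values : List String) (st : List String × PySem.Set String),
    (∀ t ∈ values, PySem.Str.strip t = t ∧ t ≠ "") →
    values.foldl (fun st item =>
      let text := PySem.Str.strip (if item = "" then "" else item)
      if text = "" ∨ st.2.contains text then st
      else (st.1 ++ [text], st.2.add text)) st
    = values.foldl (fun st t => if st.2.contains t then st else (st.1 ++ [t], st.2.add t)) st := by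
  intro values
  induction values with
  | nil => intro st _; rfl
  | cons a l ih =>
      intro st hv
      obtain ⟨hs, hne⟩ := hv a List.mem_cons_self
      simp only [List.foldl_cons]
      rw [show (let text := PySem.Str.strip (if a = "" then "" else a);
          if text = "" ∨ st.2.contains text then st
          else (st.1 ++ [text], st.2.add text))
        = (if st.2.contains a then st else (st.1 ++ [a], st.2.add a)) from by
          simp [hs, hne]]
      exact ih _ (fun t ht => hv t (List.mem_cons_of_mem a ht))

theorem dedupe_eq (values : List String)
    (hv : ∀ t ∈ values, PySem.Str.strip t = t ∧ t ≠ "") :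
    dedupeA values = dedupeB values := by
  unfold dedupeA dedupeB
  rw [dedupeAB_fold values _ hv]

-- ===== VERDICT (by name: the statement is the Claim_ definition above) =====
theorem merged_scope_root_candidates_py_spec : Claim_equal_merged_scope_root_candidates_py := by
  intro host _
  unfold Spec_merged_scope_root_candidates_py merged_scope_root_candidates_py merged_scope_root_candidates_py_alt
  simp only [toStrListA_eq]
  have hrm := fun t ht => cleanB_mem ((PySem.Dict.mk host).getD "resolved_skill_roots" []) t ht
  have hdm := fun t ht => cleanB_mem ((PySem.Dict.mk host).getD "declared_skill_roots" []) t ht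
  rw [loop_eq _ _ hrm hdm]
  set r := cleanB ((PySem.Dict.mk host).getD "resolved_skill_roots" []) with hr
  set d := cleanB ((PySem.Dict.mk host).getD "declared_skill_roots" []) with hd
  by_cases hne : r ++ d.drop r.length = []
  · obtain ⟨hre, hdrop⟩ := List.append_eq_nil_iff.1 hne
    have hde : d = [] := by rw [hre] at hdrop; simpa using hdrop
    rw [hne, hre, hde]
    simp [dedupeA, dedupeB]
  · rw [if_pos hne]
    exact dedupe_eq _ (by
      intro t ht
      rcases List.mem_append.1 ht with h | h
      · exact hrm t h
      · exact hdm t (List.mem_of_mem_drop h))
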